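-- pv_equiv track=rewrite | github.com/ljwljy51/Algorithm | Programmers/코딩테스트_고득점_Kit/BruteForce/level1_모의고사.py | solution
-- ===== SOURCE A (Python) =====
-- def check_answer(answers, person):
--     cnt = 0
--     for i in range(len(answers)):
--         if answers[i] == person[i]:
--             cnt += 1
--     return cnt
--
-- def solution(answers):
--     first_num = [1, 2, 3, 4, 5]  # 각 사람 별 찍는 방식
--     second_num = [2, 1, 2, 3, 2, 4, 2, 5]
--     third_num = [3, 3, 1, 1, 2, 2, 4, 4, 5, 5]
--     first_a = (
--         first_num * (len(answers) // len(first_num))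
--         + first_num[: (len(answers) % len(first_num))]
--     )
--     second_a = (
--         second_num * (len(answers) // len(second_num))
--         + second_num[: (len(answers) % len(second_num))]
--     )
--     third_a = (
--         third_num * (len(answers) // len(third_num))
--         + third_num[: (len(answers) % len(third_num))]
--     )  # 각자의 답안 리스트 생성
--
--     dict_cnt = {}  # 맞은 개수 기록하는 dictionary
--     dict_cnt[1] = check_answer(answers, first_a)
--     dict_cnt[2] = check_answer(answers, second_a)
--     dict_cnt[3] = check_answer(answers, third_a)
--     answer = [
--         k for k, v in dict_cnt.items() if max(dict_cnt.values()) == v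
--     ]  # 이렇게 안하고 그냥 max함수 쓰면 최대값 여러 개인 경우 하나만 나옴
--
--     return answer
-- ===== SOURCE B (Python) =====
-- def solution(answers):
--     patterns = [
--         [1, 2, 3, 4, 5],
--         [2, 1, 2, 3, 2, 4, 2, 5],
--         [3, 3, 1, 1, 2, 2, 4, 4, 5, 5],
--     ]
--     # column-wise scoring: slot j of pattern p governs answer positions j, j+L, j+2L, ...
--     # so p's score is the sum over its slots of how often that slot's digit occurs there
--     scores = [
--         sum(answers[j::len(p)].count(p[j]) for j in range(len(p)))
--         for p in patterns
--     ]
--     m = max(scores)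
--     return [i + 1 for i, s in enumerate(scores) if s == m]
-- ===== Notes on version B (the rewrite author's own statement) =====
-- stated objective: alternative
-- what changed: A materialises three full repeated answer sheets the length of the input and scans each elementwise; B never builds a sheet and never compares positions one by one: it scores column-wise, summing for each of the 23 pattern slots the count of that slot's digit in the corresponding strided slice answers[j::L], then picks the argmax indices.
import Mathlib
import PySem

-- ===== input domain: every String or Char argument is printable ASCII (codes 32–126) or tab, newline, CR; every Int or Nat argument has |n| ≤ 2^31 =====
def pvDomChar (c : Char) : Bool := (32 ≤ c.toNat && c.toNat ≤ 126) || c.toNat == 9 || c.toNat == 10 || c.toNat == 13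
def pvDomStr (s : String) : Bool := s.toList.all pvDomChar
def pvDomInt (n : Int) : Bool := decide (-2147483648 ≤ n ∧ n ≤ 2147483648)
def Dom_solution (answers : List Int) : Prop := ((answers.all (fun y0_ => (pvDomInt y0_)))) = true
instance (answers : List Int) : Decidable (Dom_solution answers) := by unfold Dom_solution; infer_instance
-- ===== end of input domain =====

-- B scores column-wise: for each slot j of each base pattern it counts that slot's digit in
-- the strided slice answers[j::L] (23 constant slice+count passes), instead of A's
-- materialised repeated sheets scanned elementwise; same results, picked in order 1,2,3.

-- ===== PORT A =====
-- check_answer: indices are always in range at A's call sites (person has length len(answers)),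
-- so pyGetD is exact there.
def check_answer (answers person : List Int) : Int :=
  (PySem.List.pyRange 0 (answers.length : Int) 1).foldl
    (fun cnt i =>
      if PySem.List.pyGetD answers i 0 = PySem.List.pyGetD person i 0 then cnt + 1 else cnt) 0

def solution (answers : List Int) : List Int :=
  let first_num : List Int := [1, 2, 3, 4, 5]
  let second_num : List Int := [2, 1, 2, 3, 2, 4, 2, 5]
  let third_num : List Int := [3, 3, 1, 1, 2, 2, 4, 4, 5, 5]
  let n : Int := (answers.length : Int)
  let first_a :=
    (List.replicate (PySem.Int.floordiv n (first_num.length : Int)).toNat first_num).flatten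
      ++ PySem.List.slice first_num none (some (PySem.Int.mod n (first_num.length : Int)))
  let second_a :=
    (List.replicate (PySem.Int.floordiv n (second_num.length : Int)).toNat second_num).flatten
      ++ PySem.List.slice second_num none (some (PySem.Int.mod n (second_num.length : Int)))
  let third_a :=
    (List.replicate (PySem.Int.floordiv n (third_num.length : Int)).toNat third_num).flatten
      ++ PySem.List.slice third_num none (some (PySem.Int.mod n (third_num.length : Int)))
  let dict_cnt : PySem.Dict Int Int :=
    ((PySem.Dict.empty.insert 1 (check_answer answers first_a)).insert 2
        (check_answer answers second_a)).insert 3 (check_answer answers third_a)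
  (dict_cnt.items.filter
      (fun kv => PySem.List.max? dict_cnt.values (fun v => v) = some kv.2)).map (fun kv => kv.1)

-- ===== PORT B =====
-- answers[j::len(p)] never raises (step = 5/8/10 ≠ 0), so slice?'s .getD [] is exact here;
-- max(scores) is over the nonempty literal scores list, so max?'s .getD 0 is exact too.
def solution_alt (answers : List Int) : List Int :=
  let patterns : List (List Int) :=
    [[1, 2, 3, 4, 5], [2, 1, 2, 3, 2, 4, 2, 5], [3, 3, 1, 1, 2, 2, 4, 4, 5, 5]]
  let scores : List Int :=
    patterns.map (fun p =>
      ((PySem.List.pyRange 0 (p.length : Int) 1).map (fun j =>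
          ((((PySem.List.slice? answers (some j) none (p.length : Int)).getD []).count
              (PySem.List.pyGetD p j 0) : Nat) : Int))).sum)
  let m : Int := (PySem.List.max? scores (fun v => v)).getD 0
  ((PySem.List.enumerate scores 0).filter (fun is => is.2 = m)).map (fun is => is.1 + 1)

-- ===== PRECONDITION & SPEC =====
def Spec_solution (answers : List Int) (out : List Int) : Prop := out = solution_alt answers
instance (answers : List Int) (out : List Int) : Decidable (Spec_solution answers out) := by unfold Spec_solution; infer_instance

-- ===== CLAIM (what is proved, stated in full; the proofs are below) =====
def Claim_equal_solution : Prop := ∀ (answers : List Int), Dom_solution answers → Spec_solution answers (solution answers)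

-- ===== LEMMAS AND PROOFS =====

-- the common reference count: matches of xs against pattern p taken cyclically from offset k
def matchCnt (xs p : List Int) (k : Nat) : Int :=
  ((List.range xs.length).countP (fun j => xs.getD j 0 = p.getD ((k + j) % p.length) 0) : Int)

theorem matchCnt_nil (p : List Int) (k : Nat) : matchCnt [] p k = 0 := by
  simp [matchCnt]

theorem matchCnt_cons (x : Int) (xs p : List Int) (k : Nat) :
    matchCnt (x :: xs) p k =
      (if x = p.getD (k % p.length) 0 then 1 else 0) + matchCnt xs p (k + 1) := by
  simp only [matchCnt, List.length_cons, List.range_succ_eq_map, List.countP_cons,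
    List.countP_map]
  have hshift :
      (List.range xs.length).countP
          (fun j => (x :: xs).getD (j + 1) 0 = p.getD ((k + (j + 1)) % p.length) 0) =
        (List.range xs.length).countP
          (fun j => xs.getD j 0 = p.getD ((k + 1 + j) % p.length) 0) := by
    apply List.countP_congr
    intro j _
    have : k + (j + 1) = k + 1 + j := by omega
    simp [this]
  simp only [Function.comp_def] at *
  rw [hshift]
  split_ifs with h <;> simp at * <;> omega

-- flatten of replicate, pointwise
theorem flatten_replicate_getD (p : List Int) (q i : Nat)
    (hi : i < q * p.length) :
    (List.replicate q p).flatten.getD i 0 = p.getD (i % p.length) 0 := by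
  induction q generalizing i with
  | zero => omega
  | succ q ih =>
    simp only [List.replicate_succ, List.flatten_cons]
    by_cases h : i < p.length
    · rw [List.getD_append _ _ _ _ h, Nat.mod_eq_of_lt h]
    · push_neg at h
      rw [List.getD_append_right _ _ _ _ h]
      have hlt : i - p.length < q * p.length := by
        have h1 : (q + 1) * p.length = q * p.length + p.length := by ring
        omega
      rw [ih _ hlt]
      congr 1
      exact (Nat.mod_eq_sub_mod h).symm

-- the repeated answer sheet A builds, pointwise: index i reads p[i % len p]
theorem rep_getD (p : List Int) (hp : 0 < p.length) (n i : Nat) (hi : i < n) :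
    ((List.replicate (n / p.length) p).flatten ++ p.take (n % p.length)).getD i 0 =
      p.getD (i % p.length) 0 := by
  have hlen : (List.replicate (n / p.length) p).flatten.length = n / p.length * p.length := by
    simp [mul_comm]
  have hdm : n / p.length * p.length + n % p.length = n := by
    rw [mul_comm]
    exact Nat.div_add_mod n p.length
  by_cases h : i < n / p.length * p.length
  · rw [List.getD_append _ _ _ _ (by rw [hlen]; exact h)]
    exact flatten_replicate_getD p _ i h
  · push_neg at h
    rw [List.getD_append_right _ _ _ _ (by rw [hlen]; exact h), hlen]
    have hj : i - n / p.length * p.length < n % p.length := by omega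
    have hjlt : i - n / p.length * p.length < p.length := by
      have := Nat.mod_lt n hp
      omega
    have heq : i % p.length = i - n / p.length * p.length := by
      conv_lhs =>
        rw [show i = (i - n / p.length * p.length) + n / p.length * p.length by omega]
      rw [Nat.add_mul_mod_self_right, Nat.mod_eq_of_lt hjlt]
    rw [heq]
    simp [List.getD_eq_getElem?_getD, hj]

-- A's check_answer over the repeated sheet IS matchCnt from offset 0
theorem check_eq_matchCnt (answers p : List Int) (hp : 0 < p.length) :
    check_answer answers
        ((List.replicate (PySem.Int.floordiv (answers.length : Int) (p.length : Int)).toNat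
            p).flatten ++
          PySem.List.slice p none (some (PySem.Int.mod (answers.length : Int) (p.length : Int)))) =
      matchCnt answers p 0 := by
  have hcnt : ∀ (ps : List Int),
      (List.range answers.length).foldl
          (fun cnt j => if answers.getD j 0 = ps.getD j 0 then cnt + 1 else cnt) (0 : Int) =
        ((List.range answers.length).countP
            (fun j => decide (answers.getD j 0 = ps.getD j 0)) : Int) := by
    intro ps
    simpa using
      PySem.List.foldl_count_if (fun j => decide (answers.getD j 0 = ps.getD j 0))
        (List.range answers.length) 0
  unfold check_answer
  rw [PySem.Int.floordiv_natCast, PySem.Int.mod_natCast, PySem.List.slice_to_natCast,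
    PySem.List.pyRange_zero_nat, List.foldl_map]
  simp only [Int.toNat_natCast, PySem.List.pyGetD_natCast]
  rw [hcnt]
  unfold matchCnt
  congr 1
  apply List.countP_congr
  intro j hj
  have hjn : j < answers.length := List.mem_range.mp hj
  rw [rep_getD p hp answers.length j hjn]
  simp

-- ===== B side: strided slices, column-wise =====

-- the strided subsequence answers[j::L] as a structural recursion (proof object only)
def stride (xs : List Int) (j L : Nat) : List Int :=
  if _h : j < xs.length then
    if _hL : 0 < L then xs.getD j 0 :: stride (xs.drop L) j L else []
  else []
termination_by xs.length
decreasing_by simp; omega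

theorem stride_of_lt (xs : List Int) (j L : Nat) (h : j < xs.length) (hL : 0 < L) :
    stride xs j L = xs.getD j 0 :: stride (xs.drop L) j L := by
  rw [stride]; simp [h, hL]

theorem stride_of_ge (xs : List Int) (j L : Nat) (h : xs.length ≤ j) :
    stride xs j L = [] := by
  rw [stride]; simp [Nat.not_lt.mpr h]

-- the filterMap slice? produces, with clean Nat data
def sliceBody (xs : List Int) (j L : Nat) : List Int :=
  (List.range (if j < xs.length then (xs.length - j + L - 1) / L else 0)).filterMap
    (fun k => xs[(j + L * k)]?)

theorem slice?_eq_sliceBody (xs : List Int) (j L : Nat) (hL : 0 < L) :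
    (PySem.List.slice? xs (some (j : Int)) none (L : Int)).getD [] = sliceBody xs j L := by
  unfold PySem.List.slice? PySem.List.sliceIndices sliceBody
  have hstep0 : ¬ ((L : Int) = 0) := by omega
  have hstepneg : ¬ ((L : Int) < 0) := by omega
  have hjneg : ¬ ((j : Int) < 0) := by omega
  have hLpos : (0 : Int) < (L : Int) := by omega
  simp only [hstep0, if_false, hstepneg, hjneg, hLpos, if_true, Option.getD_some]
  by_cases hj : j < xs.length
  · have hmin : min ((j : Int)) ((xs.length : Int)) = (j : Int) := by omega
    have hcast : ((xs.length : Int) - (j : Int) + (L : Int) - 1) =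
        ((xs.length - j + L - 1 : Nat) : Int) := by omega
    have hc : (((xs.length : Int) - (j : Int) + (L : Int) - 1) / (L : Int)).toNat =
        (xs.length - j + L - 1) / L := by
      rw [hcast, ← Int.natCast_div, Int.toNat_natCast]
    rw [hmin]
    simp only [hj, if_pos, hc, show ((j : Int) < (xs.length : Int)) from by omega]
    apply List.filterMap_congr
    intro k _
    rfl
  · have hmin : min ((j : Int)) ((xs.length : Int)) = (xs.length : Int) := by omega
    rw [hmin]
    simp [hj]

theorem sliceBody_eq_stride (xs : List Int) (j L : Nat) (hL : 0 < L) :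
    sliceBody xs j L = stride xs j L := by
  by_cases hj : j < xs.length
  · rw [stride_of_lt xs j L hj hL, ← sliceBody_eq_stride (xs.drop L) j L hL]
    unfold sliceBody
    obtain ⟨c', hc'⟩ : ∃ c', (xs.length - j + L - 1) / L = c' + 1 := by
      refine ⟨(xs.length - j + L - 1) / L - 1, ?_⟩
      have h1 : L ≤ xs.length - j + L - 1 := by omega
      have h2 := Nat.le_div_iff_mul_le hL |>.mpr
        (by omega : 1 * L ≤ xs.length - j + L - 1)
      omega
    rw [if_pos hj, hc', List.range_succ_eq_map, List.filterMap_cons, List.filterMap_map]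
    have h0 : xs[(j + L * 0)]? = some (xs.getD j 0) := by
      simp [List.getD_eq_getElem?_getD, List.getElem?_eq_getElem hj]
    rw [h0]
    congr 1
    have hfun : (fun k => xs[(j + L * k)]?) ∘ Nat.succ =
        fun k => (xs.drop L)[(j + L * k)]? := by
      funext k
      have hidx : j + L * Nat.succ k = L + (j + L * k) := by
        simp only [Nat.mul_succ]; omega
      simp only [Function.comp_apply, List.getElem?_drop, hidx]
    rw [hfun]
    by_cases hj2 : j < xs.length - L
    · have hlen : (xs.drop L).length = xs.length - L := by simp
      have hnum : xs.length - j + L - 1 = (xs.length - L - j + L - 1) + L := by omega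
      rw [hnum, Nat.add_div_right _ hL] at hc'
      have hc2 : (xs.length - L - j + L - 1) / L = c' := by omega
      rw [if_pos (by omega : j < (xs.drop L).length), hlen, hc2]
    · rw [if_neg (by simp; omega : ¬ j < (xs.drop L).length)]
      have hone : (xs.length - j + L - 1) / L = 1 := by
        apply Nat.div_eq_of_lt_le <;> omega
      rw [hone] at hc'
      simp [show c' = 0 by omega]
  · rw [stride_of_ge xs j L (by omega)]
    unfold sliceBody
    rw [if_neg hj]
    simp
termination_by xs.length
decreasing_by simp; omega

-- count in column j (proof object only)
def colCnt (xs : List Int) (j L : Nat) (v : Int) : Int := ((stride xs j L).count v : Int)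

theorem colCnt_of_ge (xs : List Int) (j L : Nat) (v : Int) (h : xs.length ≤ j) :
    colCnt xs j L v = 0 := by
  simp [colCnt, stride_of_ge xs j L h]

theorem colCnt_of_lt (xs : List Int) (j L : Nat) (v : Int) (h : j < xs.length) (hL : 0 < L) :
    colCnt xs j L v = (if xs.getD j 0 = v then 1 else 0) + colCnt (xs.drop L) j L v := by
  simp only [colCnt, stride_of_lt xs j L h hL, List.count_cons]
  push_cast
  by_cases hv : xs.getD j 0 = v <;> simp <;> ring

-- matchCnt over an append splits, shifting the offset
theorem matchCnt_append (as bs p : List Int) (k : Nat) :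
    matchCnt (as ++ bs) p k = matchCnt as p k + matchCnt bs p (k + as.length) := by
  induction as generalizing k with
  | nil => simp [matchCnt_nil]
  | cons a as ih =>
    rw [List.cons_append, matchCnt_cons, matchCnt_cons, ih]
    simp only [List.length_cons]
    have : k + 1 + as.length = k + (as.length + 1) := by omega
    rw [this]
    ring

-- matchCnt is periodic in the offset with period p.length
theorem matchCnt_period (xs p : List Int) (k : Nat) :
    matchCnt xs p (k + p.length) = matchCnt xs p k := by
  unfold matchCnt
  congr 1
  apply List.countP_congr
  intro j _
  have : (k + p.length + j) % p.length = (k + j) % p.length := by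
    have : k + p.length + j = (k + j) + p.length := by omega
    rw [this, Nat.add_mod_right]
  simp [this]

-- head block: matchCnt of the first L elements as a sum over the L columns
theorem matchCnt_take (xs p : List Int) :
    matchCnt (xs.take p.length) p 0 =
      ((List.range p.length).map
          (fun j => if j < xs.length then
              (if xs.getD j 0 = p.getD j 0 then (1 : Int) else 0) else 0)).sum := by
  have hsum :
      ((List.range p.length).map
          (fun j => if j < xs.length then
              (if xs.getD j 0 = p.getD j 0 then (1 : Int) else 0) else 0)).sum =
        (((List.range p.length).countP
            (fun j => decide (j < xs.length) && decide (xs.getD j 0 = p.getD j 0))) : Int) := by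
    rw [← PySem.List.sum_map_ite_one_zero
        (fun j => decide (j < xs.length) && decide (xs.getD j 0 = p.getD j 0))]
    congr 1
    apply List.map_congr_left
    intro j _
    by_cases h1 : j < xs.length <;> by_cases h2 : xs.getD j 0 = p.getD j 0 <;> simp [h1]
  rw [hsum]
  unfold matchCnt
  congr 1
  have htlen : (xs.take p.length).length = min p.length xs.length := by simp
  rw [htlen]
  by_cases hn : xs.length < p.length
  · have hmin : min p.length xs.length = xs.length := by omega
    have hsplit : p.length = xs.length + (p.length - xs.length) := by omega
    rw [hmin]
    conv_rhs => rw [hsplit]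
    rw [List.range_add, List.countP_append, List.countP_map]
    have hz : (List.range (p.length - xs.length)).countP
        ((fun j => decide (j < xs.length) && decide (xs.getD j 0 = p.getD j 0)) ∘
          (fun x => xs.length + x)) = 0 := by
      apply List.countP_eq_zero.mpr
      intro k _
      simp
    rw [hz, Nat.add_zero]
    apply List.countP_congr
    intro j hj
    have hjn : j < xs.length := List.mem_range.mp hj
    have hjp : j < p.length := by omega
    rw [List.getD_eq_getElem?_getD, List.getElem?_take_of_lt hjp, ← List.getD_eq_getElem?_getD]
    simp [hjn, Nat.mod_eq_of_lt hjp]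
  · have hmin : min p.length xs.length = p.length := by omega
    rw [hmin]
    apply List.countP_congr
    intro j hj
    have hjp : j < p.length := List.mem_range.mp hj
    rw [List.getD_eq_getElem?_getD, List.getElem?_take_of_lt hjp, ← List.getD_eq_getElem?_getD]
    simp [show j < xs.length by omega, Nat.mod_eq_of_lt hjp]

-- the column sum for one pattern IS matchCnt
theorem colSum_eq_matchCnt (xs p : List Int) (hp : 0 < p.length) :
    ((List.range p.length).map (fun j => colCnt xs j p.length (p.getD j 0))).sum =
      matchCnt xs p 0 := by
  by_cases hx : xs = []
  · subst hx
    have hz : ∀ j ∈ List.range p.length, colCnt [] j p.length (p.getD j 0) = 0 :=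
      fun j _ => colCnt_of_ge _ _ _ _ (by simp)
    rw [List.map_congr_left hz, matchCnt_nil]
    simp
  · have hn : 0 < xs.length := List.length_pos_iff.mpr hx
    have hterm : ∀ j ∈ List.range p.length,
        colCnt xs j p.length (p.getD j 0) =
          (if j < xs.length then (if xs.getD j 0 = p.getD j 0 then (1 : Int) else 0) else 0)
            + colCnt (xs.drop p.length) j p.length (p.getD j 0) := by
      intro j _
      by_cases hj : j < xs.length
      · rw [colCnt_of_lt xs j _ _ hj hp, if_pos hj]
      · rw [colCnt_of_ge xs j _ _ (by omega),
          colCnt_of_ge _ j _ _ (by simp; omega), if_neg hj]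
        simp
    rw [List.map_congr_left hterm, PySem.List.sum_map_add_int,
      colSum_eq_matchCnt (xs.drop p.length) p hp, ← matchCnt_take xs p]
    conv_rhs => rw [← List.take_append_drop p.length xs]
    rw [matchCnt_append]
    by_cases hLn : p.length ≤ xs.length
    · have hlen : (xs.take p.length).length = p.length := by simp; omega
      have hper : matchCnt (xs.drop p.length) p p.length = matchCnt (xs.drop p.length) p 0 := by
        simpa using matchCnt_period (xs.drop p.length) p 0
      rw [hlen, Nat.zero_add, hper]
    · have hdrop : xs.drop p.length = [] := List.drop_eq_nil_of_le (by omega)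
      rw [hdrop, matchCnt_nil, matchCnt_nil]
termination_by xs.length
decreasing_by simp; omega

-- B's score expression for one pattern
theorem score_alt_eq (xs p : List Int) (hp : 0 < p.length) :
    ((PySem.List.pyRange 0 (p.length : Int) 1).map (fun j =>
        ((((PySem.List.slice? xs (some j) none (p.length : Int)).getD []).count
            (PySem.List.pyGetD p j 0) : Nat) : Int))).sum = matchCnt xs p 0 := by
  rw [PySem.List.pyRange_zero_nat, List.map_map]
  rw [← colSum_eq_matchCnt xs p hp]
  congr 1
  apply List.map_congr_left
  intro j hj
  simp only [Function.comp_apply, PySem.List.pyGetD_natCast]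
  rw [slice?_eq_sliceBody xs j p.length hp, sliceBody_eq_stride xs j p.length hp]
  rfl

-- the tail of both programs: pick the argmax keys, in order 1,2,3
theorem endgame (a b c : Int) :
    ((((PySem.Dict.empty.insert (1 : Int) a).insert 2 b).insert 3 c).items.filter
        (fun kv =>
          PySem.List.max? ((((PySem.Dict.empty.insert (1 : Int) a).insert 2 b).insert 3 c).values)
              (fun v => v) = some kv.2)).map (fun kv => kv.1) =
      ((PySem.List.enumerate [a, b, c] 0).filter
          (fun is => is.2 = (PySem.List.max? [a, b, c] (fun v => v)).getD 0)).map
        (fun is => is.1 + 1) := by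
  have hitems :
      (((PySem.Dict.empty.insert (1 : Int) a).insert 2 b).insert 3 c).items =
        [(1, a), (2, b), (3, c)] := rfl
  have hvals :
      (((PySem.Dict.empty.insert (1 : Int) a).insert 2 b).insert 3 c).values = [a, b, c] := rfl
  have hmax : PySem.List.max? [a, b, c] (fun v => v) = some (max (max a b) c) := by
    rw [PySem.List.max?_id_cons]
    simp [List.foldl, max_assoc]
  rw [hitems, hvals, hmax]
  set M := max (max a b) c with hM
  have e1 : ∀ (x : Int), (decide (some M = some x)) = decide (x = M) := by
    intro x
    simp [eq_comm]
  simp only [List.filter_cons, List.filter_nil, e1, PySem.List.enumerate_cons,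
    PySem.List.enumerate_nil, Option.getD_some]
  by_cases ha : a = M <;> by_cases hb : b = M <;> by_cases hc : c = M <;>
    simp [ha, hb, hc]

-- ===== VERDICT (by name: the statement is the Claim_ definition above) =====
set_option maxHeartbeats 1000000 in
theorem solution_spec : Claim_equal_solution := by
  intro answers _
  unfold Spec_solution
  simp only [solution, solution_alt, List.map_cons, List.map_nil]
  rw [check_eq_matchCnt answers [1, 2, 3, 4, 5] (by norm_num),
    check_eq_matchCnt answers [2, 1, 2, 3, 2, 4, 2, 5] (by norm_num),
    check_eq_matchCnt answers [3, 3, 1, 1, 2, 2, 4, 4, 5, 5] (by norm_num)]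
  simp only [score_alt_eq answers [1, 2, 3, 4, 5] (by norm_num),
    score_alt_eq answers [2, 1, 2, 3, 2, 4, 2, 5] (by norm_num),
    score_alt_eq answers [3, 3, 1, 1, 2, 2, 4, 4, 5, 5] (by norm_num)]
  exact endgame _ _ _
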